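-- pv_equiv track=rewrite | github.com/tarabrown/grimoire | shelves/scripts/regenerate.py | _type_summary
-- ===== SOURCE A (Python) =====
-- from collections import Counter
--
-- VALID_MEDIA_TYPES = {"book", "film", "music"}
--
-- def get_media_type(entry: dict) -> str:
--     """Get the media_type of an entry, defaulting to 'book'."""
--     mt = entry.get("media_type", "book")
--     return mt if mt in VALID_MEDIA_TYPES else "book"
--
-- def _type_summary(catalog: list[dict]) -> str:
--     """Return a human-readable media breakdown like '12 books, 3 films'."""
--     type_counts = Counter(get_media_type(e) for e in catalog)
--     parts = []
--     for mt in ["book", "film", "music"]: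
--         if type_counts[mt]:
--             label = "books" if mt == "book" else "films" if mt == "film" else "albums"
--             parts.append(f"{type_counts[mt]} {label}")
--     return ", ".join(parts)
-- ===== SOURCE B (Python) =====
-- VALID_MEDIA_TYPES = {"book", "film", "music"}
--
-- def get_media_type(entry: dict) -> str:
--     """Get the media_type of an entry, defaulting to 'book'."""
--     mt = entry.get("media_type", "book")
--     return mt if mt in VALID_MEDIA_TYPES else "book"
--
-- LABELS = {"book": "books", "film": "films", "music": "albums"}
--
-- def _type_summary(catalog: list[dict]) -> str:
--     # Sort the media types: alphabetical order (book < film < music) is exactly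
--     # the required output order, so a run-length scan of the sorted list yields
--     # the parts directly; empty runs cannot occur, so zero counts vanish for free.
--     types = sorted(get_media_type(e) for e in catalog)
--     parts = []
--     while types:
--         head, run = types[0], 1
--         while run < len(types) and types[run] == head:
--             run += 1
--         parts.append(f"{run} {LABELS[head]}")
--         types = types[run:]
--     return ", ".join(parts)
-- ===== Notes on version B (the rewrite author's own statement) =====
-- stated objective: alternative
-- what changed: Replaced the Counter-then-lookup counting by sort-then-group: sort the media types (alphabetical order coincides with the required book/film/music output order) and emit one part per run of equal elements, so zero counts disappear without any conditional.
import Mathlib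
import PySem

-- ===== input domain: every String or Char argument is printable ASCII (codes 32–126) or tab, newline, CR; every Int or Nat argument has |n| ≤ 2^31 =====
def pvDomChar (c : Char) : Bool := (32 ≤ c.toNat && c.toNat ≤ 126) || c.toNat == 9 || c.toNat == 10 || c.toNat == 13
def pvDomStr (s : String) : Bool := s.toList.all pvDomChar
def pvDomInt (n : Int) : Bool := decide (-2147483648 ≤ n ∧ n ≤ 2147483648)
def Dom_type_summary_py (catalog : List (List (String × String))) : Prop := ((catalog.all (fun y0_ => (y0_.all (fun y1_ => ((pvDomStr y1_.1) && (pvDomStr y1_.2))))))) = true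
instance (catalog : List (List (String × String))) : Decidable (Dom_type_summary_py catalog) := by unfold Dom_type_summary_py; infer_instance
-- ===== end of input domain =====

-- B replaces A's Counter-then-lookup counting by sort-then-group: alphabetical order of the
-- media types coincides with the required book/film/music output order, so a run-length scan
-- of the sorted list emits the parts directly and zero counts vanish for free.
-- ===== PORT A =====
def pvValidMediaTypes : PySem.Set String := PySem.Set.ofList ["book", "film", "music"]

def pvGetMediaType (entry : List (String × String)) : String :=
  let mt := (PySem.Dict.mk entry).getD "media_type" "book"
  if PySem.Set.contains pvValidMediaTypes mt then mt else "book"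

def type_summary_py (catalog : List (List (String × String))) : String :=
  let typeCounts := PySem.Dict.counter (catalog.map (fun e => pvGetMediaType e))
  let parts := ["book", "film", "music"].foldl (fun parts mt =>
    if typeCounts.getD mt 0 ≠ 0 then
      let label := if mt == "book" then "books" else if mt == "film" then "films" else "albums"
      parts ++ [PySem.Int.toStr (typeCounts.getD mt 0) ++ " " ++ label]
    else parts) []
  PySem.Str.join ", " parts

-- ===== PORT B =====
def pvMediaTypeB (entry : List (String × String)) : String :=
  let mt := (PySem.Dict.mk entry).getD "media_type" "book"
  if PySem.Set.contains pvValidMediaTypes mt then mt else "book"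

def pvLabels : PySem.Dict String String :=
  PySem.Dict.mk [("book", "books"), ("film", "films"), ("music", "albums")]

-- the outer while loop of Source B: peel one run of equal elements off the sorted list per step
def pvRuns : List String → List String
  | [] => []
  | head :: rest =>
    let run : Int := 1 + (rest.takeWhile (fun t => t == head)).length
    (PySem.Int.toStr run ++ " " ++ pvLabels.getD head "") ::
      pvRuns (rest.dropWhile (fun t => t == head))
termination_by l => l.length
decreasing_by
  exact Nat.lt_succ_of_le (List.length_dropWhile_le _ _)

def type_summary_py_alt (catalog : List (List (String × String))) : String :=
  let types := PySem.List.sorted (catalog.map (fun e => pvMediaTypeB e)) (fun x => x) false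
  PySem.Str.join ", " (pvRuns types)

-- ===== PRECONDITION & SPEC =====
def Spec_type_summary_py (catalog : List (List (String × String))) (out : String) : Prop := out = type_summary_py_alt catalog
instance (catalog : List (List (String × String))) (out : String) : Decidable (Spec_type_summary_py catalog out) := by unfold Spec_type_summary_py; infer_instance

-- ===== CLAIM =====
def Claim_equal_type_summary_py : Prop := ∀ (catalog : List (List (String × String))), Dom_type_summary_py catalog → Spec_type_summary_py catalog (type_summary_py catalog)

-- ===== LEMMAS AND PROOFS =====

-- every media type A or B computes is one of the three valid strings
lemma mediaType_cases (e : List (String × String)) :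
    pvGetMediaType e = "book" ∨ pvGetMediaType e = "film" ∨ pvGetMediaType e = "music" := by
  by_cases h : PySem.Set.contains pvValidMediaTypes ((PySem.Dict.mk e).getD "media_type" "book") = true
  · have hmem : (PySem.Dict.mk e).getD "media_type" "book" ∈ (["book","film","music"] : List String) := by
      simpa [pvValidMediaTypes, PySem.Set.contains, PySem.Set.ofList] using h
    simp only [pvGetMediaType, h, if_true]
    simpa using hmem
  · have h' : ({ items := e } : PySem.Dict String String).getD "media_type" "book" ∉ pvValidMediaTypes := by
      simpa [PySem.Set.contains] using h
    simp [pvGetMediaType, h']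

lemma takeWhile_replicate_append (c : Nat) (x : String) (rest : List String)
    (h : ∀ t ∈ rest, t ≠ x) :
    (List.replicate c x ++ rest).takeWhile (fun t => t == x) = List.replicate c x := by
  induction c with
  | zero =>
    cases rest with
    | nil => rfl
    | cons y ys => simp [h y (by simp)]
  | succ n ih => simpa [List.replicate_succ, List.takeWhile_cons] using ih

lemma dropWhile_replicate_append (c : Nat) (x : String) (rest : List String)
    (h : ∀ t ∈ rest, t ≠ x) :
    (List.replicate c x ++ rest).dropWhile (fun t => t == x) = rest := by
  induction c with
  | zero =>
    cases rest with
    | nil => rfl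
    | cons y ys => simp [h y (by simp)]
  | succ n ih => simpa [List.replicate_succ, List.dropWhile_cons] using ih

-- one step of the run scan on a leading block of c+1 copies of x
lemma runs_block (c : Nat) (x : String) (rest : List String) (h : ∀ t ∈ rest, t ≠ x) :
    pvRuns (List.replicate (c + 1) x ++ rest)
      = (PySem.Int.toStr ((c + 1 : Nat) : Int) ++ " " ++ pvLabels.getD x "") :: pvRuns rest := by
  rw [List.replicate_succ, List.cons_append, pvRuns]
  rw [takeWhile_replicate_append c x rest h, dropWhile_replicate_append c x rest h]
  simp only [List.length_replicate]
  norm_num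
  congr 1
  ring

-- the string list the run scan produces on the canonical sorted shape
def pvParts (b f m : Nat) : List String :=
  (if b = 0 then [] else [PySem.Int.toStr (b : Int) ++ " " ++ "books"]) ++
  (if f = 0 then [] else [PySem.Int.toStr (f : Int) ++ " " ++ "films"]) ++
  (if m = 0 then [] else [PySem.Int.toStr (m : Int) ++ " " ++ "albums"])

lemma runs_canonical (b f m : Nat) :
    pvRuns (List.replicate b "book" ++ (List.replicate f "film" ++ List.replicate m "music"))
      = pvParts b f m := by
  have runsM : pvRuns (List.replicate m "music")
      = (if m = 0 then [] else [PySem.Int.toStr (m : Int) ++ " " ++ "albums"]) := by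
    cases m with
    | zero => simp [pvRuns]
    | succ n =>
      have h := runs_block n "music" [] (by simp)
      simp only [List.append_nil] at h
      rw [h]
      simp [pvRuns, pvLabels, PySem.Dict.getD, PySem.Dict.get?]
  have runsFM : pvRuns (List.replicate f "film" ++ List.replicate m "music")
      = (if f = 0 then [] else [PySem.Int.toStr (f : Int) ++ " " ++ "films"]) ++
        (if m = 0 then [] else [PySem.Int.toStr (m : Int) ++ " " ++ "albums"]) := by
    cases f with
    | zero => simpa using runsM
    | succ n =>
      rw [runs_block n "film" _ (by intro t ht; simp [List.mem_replicate] at ht; simp [ht.2])]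
      simp [runsM, pvLabels, PySem.Dict.getD, PySem.Dict.get?]
  cases b with
  | zero => simpa [pvParts] using runsFM
  | succ n =>
    rw [runs_block n "book" _ (by
      intro t ht
      rcases List.mem_append.mp ht with h | h <;> simp [List.mem_replicate] at h <;> simp [h.2])]
    simp [runsFM, pvParts, pvLabels, PySem.Dict.getD, PySem.Dict.get?]

lemma le_bf : ("book" : String) ≤ "film" := by rw [String.le_iff_toList_le]; decide
lemma le_bm : ("book" : String) ≤ "music" := by rw [String.le_iff_toList_le]; decide
lemma le_fm : ("film" : String) ≤ "music" := by rw [String.le_iff_toList_le]; decide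

-- sorted(media types) is exactly the book-block, film-block, music-block concatenation
lemma sorted_canonical (catalog : List (List (String × String))) :
    PySem.List.sorted (catalog.map (fun e => pvGetMediaType e)) (fun x => x) false
      = List.replicate ((catalog.map (fun e => pvGetMediaType e)).count "book") "book" ++
        (List.replicate ((catalog.map (fun e => pvGetMediaType e)).count "film") "film" ++
         List.replicate ((catalog.map (fun e => pvGetMediaType e)).count "music") "music") := by
  set L := catalog.map (fun e => pvGetMediaType e) with hL
  apply PySem.List.sorted_id_eq_of_perm_of_pairwise
  · rw [List.perm_iff_count]
    intro a
    by_cases hb : a = "book"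
    · subst hb; simp [List.count_append, List.count_replicate]
    · by_cases hf : a = "film"
      · subst hf; simp [List.count_append, List.count_replicate]
      · by_cases hm : a = "music"
        · subst hm; simp [List.count_append, List.count_replicate]
        · have hnot : a ∉ L := by
            intro hmem
            rw [hL] at hmem
            rcases List.mem_map.mp hmem with ⟨e, _, he⟩
            rcases mediaType_cases e with h | h | h <;> simp_all
          simp [List.count_eq_zero_of_not_mem hnot, List.count_append,
            List.count_replicate, Ne.symm hb, Ne.symm hf, Ne.symm hm]
  · refine List.pairwise_append.mpr ⟨List.pairwise_replicate.mpr (by simp),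
      List.pairwise_append.mpr ⟨List.pairwise_replicate.mpr (by simp),
        List.pairwise_replicate.mpr (by simp), ?_⟩, ?_⟩
    · intro a ha b hb
      simp [List.mem_replicate] at ha hb
      rw [ha.2, hb.2]; exact le_fm
    · intro a ha b hb
      simp [List.mem_replicate] at ha
      rw [ha.2]
      rcases List.mem_append.mp hb with h | h <;> simp [List.mem_replicate] at h <;> rw [h.2]
      · exact le_bf
      · exact le_bm

-- ===== VERDICT =====
theorem type_summary_py_spec : Claim_equal_type_summary_py := by
  intro catalog _
  unfold Spec_type_summary_py type_summary_py type_summary_py_alt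
  have hBA : pvMediaTypeB = pvGetMediaType := rfl
  simp only [hBA, sorted_canonical, runs_canonical, List.foldl, PySem.Dict.getD_counter]
  set L := catalog.map (fun e => pvGetMediaType e) with hL
  by_cases hb : L.count "book" = 0 <;> by_cases hf : L.count "film" = 0 <;>
    by_cases hm : L.count "music" = 0 <;>
    simp [pvParts, hb, hf, hm, PySem.Str.join]
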